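-- pv_equiv track=rewrite | github.com/kitnerboy/termux-sms-to-telegram | sms2tg.py | format_message_for_chat
-- ===== SOURCE A (Python) =====
-- def format_message_for_chat(message):
--     """
--     Formats a message dictionary into a user-friendly string for Markdown.
--     Escapes special Markdown characters in the message body.
--     """
--     address = message.get("address", "Unknown Address")
--     received = message.get("received", "Unknown Time")
--     body = message.get("body", "No Message Body")
--
--     # Escape special Markdown characters in the message body
--     # TODO maybe not all those symbols are necessary to check
--     # See: https://core.telegram.org/bots/api#markdownv2-style
--     special_chars = ['_', '*', '~', '`', '>', '+', '=', '|']
--     escaped_body = body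
--     for char in special_chars:
--         escaped_body = escaped_body.replace(char, f'\\{char}')
--
--     return (
--         f"*From:* `{address}`\n"
--         f"*Received:* `{received}`\n"
--         f"*Message:* {escaped_body}"
--     )
-- ===== SOURCE B (Python) =====
-- def format_message_for_chat(message):
--     """
--     Formats a message dictionary into a user-friendly string for Markdown.
--     Escapes special Markdown characters in the message body.
--     """
--     address = message.get("address", "Unknown Address")
--     received = message.get("received", "Unknown Time")
--     body = message.get("body", "No Message Body")
--
--     # One pass over the body with an explicit accumulator: prepend a backslash
--     # to each Markdown-special character, then join once.
--     out = []
--     for c in body: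
--         if c in '_*~`>+=|':
--             out.append('\\')
--         out.append(c)
--
--     lines = ["*From:* `" + address + "`",
--              "*Received:* `" + received + "`",
--              "*Message:* " + ''.join(out)]
--     return "\n".join(lines)
-- ===== Notes on version B (the rewrite author's own statement) =====
-- stated objective: idiomatic
-- what changed: A rescans the whole body once per special character (8 full .replace passes, each rebuilding the string); B makes one character-by-character pass with an explicit accumulator list, emitting a backslash before each special character, joins it once, and assembles the result as a join of three lines instead of one f-string.
import Mathlib
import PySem

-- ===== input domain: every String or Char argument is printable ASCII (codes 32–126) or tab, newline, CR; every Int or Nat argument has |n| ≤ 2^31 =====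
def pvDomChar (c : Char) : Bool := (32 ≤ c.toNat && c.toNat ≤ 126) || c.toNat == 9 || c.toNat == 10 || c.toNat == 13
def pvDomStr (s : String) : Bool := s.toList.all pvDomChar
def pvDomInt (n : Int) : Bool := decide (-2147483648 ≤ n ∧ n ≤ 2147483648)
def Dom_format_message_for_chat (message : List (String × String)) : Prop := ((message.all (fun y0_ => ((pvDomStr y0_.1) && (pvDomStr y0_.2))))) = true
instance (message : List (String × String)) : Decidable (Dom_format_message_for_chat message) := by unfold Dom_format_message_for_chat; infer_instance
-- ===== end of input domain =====

-- B replaces A's eight full .replace scans by one accumulator pass over the body's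
-- characters and assembles the result as a join of three lines (same return value).

-- ===== PORT A =====
-- dict.get(k, d): first-match lookup in the association list
def pvDictGet (m : List (String × String)) (k d : String) : String :=
  match List.lookup k m with
  | some v => v
  | none => d

def format_message_for_chat (message : List (String × String)) : String :=
  let address := pvDictGet message "address" "Unknown Address"
  let received := pvDictGet message "received" "Unknown Time"
  let body := pvDictGet message "body" "No Message Body"
  let special_chars : List String := ["_", "*", "~", "`", ">", "+", "=", "|"]
  let escaped_body := special_chars.foldl (fun s ch => PySem.Str.replace s ch ("\\" ++ ch)) body
  "*From:* `" ++ address ++ "`\n" ++ "*Received:* `" ++ received ++ "`\n" ++ "*Message:* " ++ escaped_body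

-- ===== PORT B =====
-- the loop `for c in body: if c in '_*~`>+=|': out.append('\\'); out.append(c)`
def pvEscapeLoop : List Char → List Char → List Char
  | [], out => out
  | c :: rest, out =>
      pvEscapeLoop rest (if ("_*~`>+=|".toList).contains c then out ++ ['\\', c] else out ++ [c])

def format_message_for_chat_alt (message : List (String × String)) : String :=
  let address := (List.lookup "address" message).getD "Unknown Address"
  let received := (List.lookup "received" message).getD "Unknown Time"
  let body := (List.lookup "body" message).getD "No Message Body"
  let lines : List String :=
    ["*From:* `" ++ address ++ "`",
     "*Received:* `" ++ received ++ "`",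
     "*Message:* " ++ String.ofList (pvEscapeLoop body.toList [])]
  PySem.Str.join "\n" lines

-- ===== PRECONDITION & SPEC =====
def Spec_format_message_for_chat (message : List (String × String)) (out : String) : Prop := out = format_message_for_chat_alt message
instance (message : List (String × String)) (out : String) : Decidable (Spec_format_message_for_chat message out) := by unfold Spec_format_message_for_chat; infer_instance

-- ===== CLAIM (what is proved, stated in full; the proofs are below) =====
def Claim_equal_format_message_for_chat : Prop := ∀ (message : List (String × String)), Dom_format_message_for_chat message → Spec_format_message_for_chat message (format_message_for_chat message)

-- ===== LEMMAS AND PROOFS =====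

theorem pv_dictGet_eq (m : List (String × String)) (k d : String) :
    pvDictGet m k d = (List.lookup k m).getD d := by
  unfold pvDictGet
  cases List.lookup k m <;> rfl

-- replace.go for a single-char pattern, with enough fuel, is a per-character substitution
theorem pv_go_single (c0 : Char) (new : List Char) :
    ∀ (l : List Char) (fuel : Nat) (acc : List Char), l.length ≤ fuel →
      PySem.Chars.replace.go [c0] new fuel l acc
        = acc.reverse ++ l.flatMap (fun c => if c = c0 then new else [c]) := by
  intro l
  induction l with
  | nil =>
      intro fuel acc _
      cases fuel <;> simp [PySem.Chars.replace.go]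
  | cons c t ih =>
      intro fuel acc hle
      cases fuel with
      | zero => simp at hle
      | succ f =>
        have hpre : List.isPrefixOf [c0] (c :: t) = (c0 == c) := by
          simp [List.isPrefixOf]
        have hlt : t.length ≤ f := by simpa using hle
        by_cases h : c = c0
        · subst h
          rw [PySem.Chars.replace.go]
          simp only [hpre, BEq.rfl, if_true, List.drop_succ_cons, List.length_cons, List.length_nil, List.drop_zero]
          rw [ih f (new.reverse ++ acc) hlt]
          simp
        · rw [PySem.Chars.replace.go]
          have hbe : (c0 == c) = false := beq_eq_false_iff_ne.mpr (Ne.symm h)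
          simp only [hpre, hbe, Bool.false_eq_true, if_false]
          rw [ih f (c :: acc) hlt]
          simp [h]

theorem pv_replace_single (s : List Char) (c0 : Char) (new : List Char) :
    PySem.Chars.replace s [c0] new = s.flatMap (fun c => if c = c0 then new else [c]) := by
  rw [PySem.Chars.replace, if_neg (by simp)]
  simpa using pv_go_single c0 new s s.length [] (Nat.le_refl _)

-- a chain of single-char escape replaces over distinct, non-backslash specials = one pass
theorem pv_fold_escape (sp : List Char) (hnd : sp.Nodup) (hb : ('\\' : Char) ∉ sp) :
    ∀ (s : List Char),
      sp.foldl (fun acc c0 => PySem.Chars.replace acc [c0] ['\\', c0]) s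
        = s.flatMap (fun c => if c ∈ sp then ['\\', c] else [c]) := by
  induction sp with
  | nil => intro s; simp
  | cons c0 rest ih =>
      intro s
      have hnd' : rest.Nodup := hnd.of_cons
      have hc0 : c0 ∉ rest := by simpa using (List.nodup_cons.mp hnd).1
      have hb' : ('\\' : Char) ∉ rest := fun h => hb (List.mem_cons_of_mem _ h)
      simp only [List.foldl_cons]
      rw [ih hnd' hb', pv_replace_single, List.flatMap_assoc]
      congr 1
      funext c
      by_cases h : c = c0
      · subst h
        simp [if_neg hb', if_neg hc0]
      · by_cases hc : c ∈ rest <;> simp [h, hc]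

-- the accumulator loop is the same one-pass substitution
theorem pv_escapeLoop_eq :
    ∀ (cs out : List Char),
      pvEscapeLoop cs out
        = out ++ cs.flatMap (fun c => if c ∈ ("_*~`>+=|".toList) then ['\\', c] else [c]) := by
  intro cs
  induction cs with
  | nil => intro out; simp [pvEscapeLoop]
  | cons c rest ih =>
      intro out
      rw [pvEscapeLoop, ih]
      split <;> rename_i h <;> simp at h <;> simp [h]

-- closed-form toList of the literal pieces
theorem pv_t1 : ("\\" ++ "_" : String).toList = ['\\', '_'] := by decide
theorem pv_t2 : ("\\" ++ "*" : String).toList = ['\\', '*'] := by decide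
theorem pv_t3 : ("\\" ++ "~" : String).toList = ['\\', '~'] := by decide
theorem pv_t4 : ("\\" ++ "`" : String).toList = ['\\', '`'] := by decide
theorem pv_t5 : ("\\" ++ ">" : String).toList = ['\\', '>'] := by decide
theorem pv_t6 : ("\\" ++ "+" : String).toList = ['\\', '+'] := by decide
theorem pv_t7 : ("\\" ++ "=" : String).toList = ['\\', '='] := by decide
theorem pv_t8 : ("\\" ++ "|" : String).toList = ['\\', '|'] := by decide
theorem pv_s1 : ("_" : String).toList = ['_'] := by decide
theorem pv_s2 : ("*" : String).toList = ['*'] := by decide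
theorem pv_s3 : ("~" : String).toList = ['~'] := by decide
theorem pv_s4 : ("`" : String).toList = ['`'] := by decide
theorem pv_s5 : (">" : String).toList = ['>'] := by decide
theorem pv_s6 : ("+" : String).toList = ['+'] := by decide
theorem pv_s7 : ("=" : String).toList = ['='] := by decide
theorem pv_s8 : ("|" : String).toList = ['|'] := by decide

theorem pv_escaped_eq (body : String) :
    (["_", "*", "~", "`", ">", "+", "=", "|"] : List String).foldl
        (fun s ch => PySem.Str.replace s ch ("\\" ++ ch)) body
      = String.ofList (pvEscapeLoop body.toList []) := by
  rw [pv_escapeLoop_eq, List.nil_append,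
    show ("_*~`>+=|".toList) = (['_', '*', '~', '`', '>', '+', '=', '|'] : List Char) from by decide,
    ← pv_fold_escape ['_', '*', '~', '`', '>', '+', '=', '|'] (by decide) (by decide)]
  simp only [List.foldl_cons, List.foldl_nil, PySem.Str.replace,
    String.toList_ofList, pv_t1, pv_t2, pv_t3, pv_t4, pv_t5, pv_t6, pv_t7, pv_t8,
    pv_s1, pv_s2, pv_s3, pv_s4, pv_s5, pv_s6, pv_s7, pv_s8]

theorem pv_join3 (a b c : String) :
    PySem.Str.join "\n" [a, b, c] = a ++ "\n" ++ b ++ "\n" ++ c := by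
  apply String.ext
  simp [PySem.Str.toList_join, PySem.Chars.join_cons_cons, PySem.Chars.join_singleton]

-- ===== VERDICT (by name: the statement is the Claim_ definition above) =====
theorem format_message_for_chat_spec : Claim_equal_format_message_for_chat := by
  intro message _
  unfold Spec_format_message_for_chat
  simp only [format_message_for_chat, format_message_for_chat_alt, pv_dictGet_eq,
    pv_escaped_eq, pv_join3]
  apply String.ext
  simp [String.append_assoc]
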